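-- pv_equiv track=rewrite | github.com/IgrMd/yandex-algos-training | Тренировки по алгоритмам 8.0/Тема 3, 4. Одномерное динамическое программирование. Двумерное динамическое программирование/I.py | chain_in_table
-- ===== SOURCE A (Python) =====
-- def chain_in_table(n, m, table: list[list]):
--     dp = [[-1] * m for _ in range(n)]
--     diffs = [(-1, 0), (0, -1), (1, 0), (0, 1)]
--
--     def helper(i2, j2):
--         dp[i2][j2] = 1
--         for di2, dj2 in diffs:
--             adj_i2 = i2 + di2
--             adj_j2 = j2 + dj2
--             if adj_i2 == n or adj_i2 < 0 or adj_j2 == m or adj_j2 < 0: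
--                 continue
--             curr2 = table[i2][j2]
--             adj2 = table[adj_i2][adj_j2]
--             if curr2 - adj2 == 1:
--                 if dp[adj_i2][adj_j2] == -1:
--                     dp[i2][j2] = max(dp[i2][j2], helper(adj_i2, adj_j2) + 1)
--                 else:
--                     dp[i2][j2] = max(dp[i2][j2], dp[adj_i2][adj_j2] + 1)
--         return dp[i2][j2]
--
--     for i in range(n):
--         for j in range(m):
--             curr = table[i][j]
--             if dp[i][j] != -1:
--                 continue
--             dp[i][j] = 1
--             for di, dj in diffs:
--                 adj_i = i + di
--                 adj_j = j + dj
--                 if adj_i == n or adj_i < 0 or adj_j == m or adj_j < 0: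
--                     continue
--                 adj = table[adj_i][adj_j]
--                 if curr - adj == 1:
--                     if dp[adj_i][adj_j] == -1:
--                         dp[i][j] = max(dp[i][j], helper(adj_i, adj_j) + 1)
--                     else:
--                         dp[i][j] = max(dp[i][j], dp[adj_i][adj_j] + 1)
--
--     ans = 0
--     for i in range(n):
--         for j in range(m):
--             ans = max(ans, dp[i][j])
--     return ans
-- ===== SOURCE B (Python) =====
-- def chain_in_table(n, m, table: list[list]):
--     # sort cells by value; relax each cell from its already-final smaller neighbors
--     order = sorted([(table[i][j], (i, j)) for i in range(n) for j in range(m)],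
--                    key=lambda t: t[0])
--     dp = {}
--     ans = 0
--     for v, (i, j) in order:
--         best = 1
--         for ai, aj in ((i - 1, j), (i, j - 1), (i + 1, j), (i, j + 1)):
--             if 0 <= ai < n and 0 <= aj < m and table[ai][aj] == v - 1:
--                 best = max(best, dp[(ai, aj)] + 1)
--         dp[(i, j)] = best
--         ans = max(ans, best)
--     return ans
-- ===== Notes on version B (the rewrite author's own statement) =====
-- stated objective: alternative
-- what changed: A's memoized recursive DFS (helper recursion with a -1-initialized dp table) is replaced by an iteration-free bottom-up DP: collect all cells, sort them by value, and relax each cell once from its four already-finalized by-1-smaller neighbors while tracking a running maximum.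
-- outside the precondition, e.g. on chain_in_table(2, 2, [[1, 2]]): A raises IndexError, B raises IndexError
import Mathlib
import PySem

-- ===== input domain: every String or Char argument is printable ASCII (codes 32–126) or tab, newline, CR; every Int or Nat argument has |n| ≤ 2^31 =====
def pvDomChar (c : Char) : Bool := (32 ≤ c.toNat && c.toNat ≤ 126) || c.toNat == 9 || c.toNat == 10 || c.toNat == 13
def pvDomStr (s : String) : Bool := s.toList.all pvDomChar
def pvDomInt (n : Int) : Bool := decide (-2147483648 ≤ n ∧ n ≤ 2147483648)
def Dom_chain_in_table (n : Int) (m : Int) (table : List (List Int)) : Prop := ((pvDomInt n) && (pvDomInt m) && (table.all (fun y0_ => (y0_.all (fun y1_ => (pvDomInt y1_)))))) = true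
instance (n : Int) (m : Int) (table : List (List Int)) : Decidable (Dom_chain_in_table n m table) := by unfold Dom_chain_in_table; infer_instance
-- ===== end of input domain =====

-- B replaces A's memoized recursive DFS by a sort-by-value bottom-up DP (alternative
-- algorithm, not claimed faster); return values proved equal on all inputs where A raises
-- no exception.

-- ===== PORT A =====

def pvDiffs : List (Int × Int) := [(-1, 0), (0, -1), (1, 0), (0, 1)]

-- table[i][j]; the defaults are irrelevant under Pre_ (every access A makes is in bounds)
def pvVal (table : List (List Int)) (i j : Int) : Int :=
  PySem.List.pyGetD (PySem.List.pyGetD table i []) j 0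

-- the body of A's neighbour loop (the same code appears verbatim in A's `helper` and in
-- A's outer loop; `h` is the recursive call to `helper`)
def pvAStep (n m : Int) (table : List (List Int))
    (h : (Int × Int) → ((Int × Int) → Int) → (((Int × Int) → Int) × Int))
    (c : Int × Int) (dp : (Int × Int) → Int) (d : Int × Int) : (Int × Int) → Int :=
  let a := (c.1 + d.1, c.2 + d.2)
  if a.1 = n ∨ a.1 < 0 ∨ a.2 = m ∨ a.2 < 0 then dp
  else if pvVal table c.1 c.2 - pvVal table a.1 a.2 = 1 then
    (if dp a = -1 then
      let old := dp c
      let r := h a dp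
      fun x => if x = c then max old (r.2 + 1) else r.1 x
    else
      fun x => if x = c then max (dp c) (dp a + 1) else dp x)
  else dp

-- A's recursive `helper`; the fuel argument exists only for totality (the port passes
-- n.toNat * m.toNat + 1, which the recursion never exhausts: each call strictly
-- decreases the cell value, so the depth is at most the number of grid cells)
def pvHelperA (n m : Int) (table : List (List Int)) :
    Nat → (Int × Int) → ((Int × Int) → Int) → (((Int × Int) → Int) × Int)
  | 0, c, dp => (dp, dp c)
  | F + 1, c, dp =>
    let dp1 := pvDiffs.foldl (pvAStep n m table (pvHelperA n m table F) c)
      (fun x => if x = c then 1 else dp x)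
    (dp1, dp1 c)

def chain_in_table (n : Int) (m : Int) (table : List (List Int)) : Int :=
  let fuel := n.toNat * m.toNat + 1
  let dp := (PySem.List.pyRange 0 n 1).foldl (fun dp i =>
    (PySem.List.pyRange 0 m 1).foldl (fun dp j =>
      if dp (i, j) ≠ -1 then dp
      else
        pvDiffs.foldl (pvAStep n m table (pvHelperA n m table fuel) (i, j))
          (fun x => if x = (i, j) then 1 else dp x)) dp)
    (fun _ => (-1 : Int))
  (PySem.List.pyRange 0 n 1).foldl (fun ans i =>
    (PySem.List.pyRange 0 m 1).foldl (fun ans j => max ans (dp (i, j))) ans) 0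

-- ===== PORT B =====

def chain_in_table_alt (n : Int) (m : Int) (table : List (List Int)) : Int :=
  let order := PySem.List.sorted
    ((PySem.List.pyRange 0 n 1).flatMap (fun i =>
      (PySem.List.pyRange 0 m 1).map (fun j => (pvVal table i j, (i, j)))))
    (fun t => t.1) false
  let st := order.foldl (fun (st : ((Int × Int) → Int) × Int) t =>
    let i := t.2.1
    let j := t.2.2
    let best := [(i - 1, j), (i, j - 1), (i + 1, j), (i, j + 1)].foldl
      (fun best a =>
        if 0 ≤ a.1 ∧ a.1 < n ∧ 0 ≤ a.2 ∧ a.2 < m ∧ pvVal table a.1 a.2 = t.1 - 1 then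
          max best (st.1 a + 1)
        else best) 1
    (fun x => if x = (i, j) then best else st.1 x, max st.2 best))
    (fun _ => (0 : Int), 0)
  st.2

-- ===== PRECONDITION & SPEC =====
-- Pre_ excludes exactly the inputs on which Python A raises an IndexError: when both
-- loop bounds are positive A indexes table[i][j] for all i < n, j < m.
def Pre_chain_in_table (n : Int) (m : Int) (table : List (List Int)) : Prop :=
  0 < n → 0 < m →
    (n ≤ (table.length : Int) ∧ ∀ r ∈ table.take n.toNat, m ≤ (r.length : Int))
instance (n : Int) (m : Int) (table : List (List Int)) : Decidable (Pre_chain_in_table n m table) := by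
  unfold Pre_chain_in_table; infer_instance

def pvWitness_chain_in_table : Int × Int × List (List Int) := (2, 2, [[1, 2], [4, 3]])

def Spec_chain_in_table (n : Int) (m : Int) (table : List (List Int)) (out : Int) : Prop := out = chain_in_table_alt n m table
instance (n : Int) (m : Int) (table : List (List Int)) (out : Int) : Decidable (Spec_chain_in_table n m table out) := by unfold Spec_chain_in_table; infer_instance

-- ===== CLAIM (what is proved, stated in full; the proofs are below) =====
def Claim_equal_chain_in_table : Prop := ∀ (n : Int) (m : Int) (table : List (List Int)), Dom_chain_in_table n m table → Pre_chain_in_table n m table → Spec_chain_in_table n m table (chain_in_table n m table)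

-- ===== LEMMAS AND PROOFS =====

-- in-bounds cells, cell value, specification chain length
abbrev pvInb (n m : Int) (a : Int × Int) : Prop :=
  0 ≤ a.1 ∧ a.1 < n ∧ 0 ≤ a.2 ∧ a.2 < m

abbrev pvV (t : List (List Int)) (c : Int × Int) : Int := pvVal t c.1 c.2

def pvCells (n m : Int) : List (Int × Int) :=
  (PySem.List.pyRange 0 n 1).flatMap (fun i =>
    (PySem.List.pyRange 0 m 1).map (fun j => (i, j)))

def pvNv (n m : Int) (t : List (List Int)) (v : Int) : Nat :=
  (pvCells n m).countP (fun c => decide (pvV t c < v))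

def pvFoldstep (n m : Int) (t : List (List Int)) (c : Int × Int)
    (g : (Int × Int) → Int) (ds : List (Int × Int)) (b : Int) : Int :=
  ds.foldl (fun b d =>
    if 0 ≤ c.1 + d.1 ∧ c.1 + d.1 < n ∧ 0 ≤ c.2 + d.2 ∧ c.2 + d.2 < m ∧
        pvV t (c.1 + d.1, c.2 + d.2) = pvV t c - 1 then
      max b (g (c.1 + d.1, c.2 + d.2) + 1)
    else b) b

-- the length of the longest by-1-decreasing chain starting at c, with fuel k
def pvL (n m : Int) (t : List (List Int)) : Nat → (Int × Int) → Int
  | 0, _ => 1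
  | k + 1, c => pvFoldstep n m t c (pvL n m t k) pvDiffs 1

def pvLL (n m : Int) (t : List (List Int)) (c : Int × Int) : Int :=
  pvL n m t (n.toNat * m.toNat) c

lemma mem_pvCells (n m : Int) (c : Int × Int) : c ∈ pvCells n m ↔ pvInb n m c := by
  constructor
  · intro h
    rcases List.mem_flatMap.1 h with ⟨i, hi, hc⟩
    rcases List.mem_map.1 hc with ⟨j, hj, rfl⟩
    rcases (PySem.List.mem_pyRange_one).1 hi with ⟨h1, h2⟩
    rcases (PySem.List.mem_pyRange_one).1 hj with ⟨h3, h4⟩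
    exact ⟨h1, h2, h3, h4⟩
  · rintro ⟨h1, h2, h3, h4⟩
    refine List.mem_flatMap.2 ⟨c.1, ?_, ?_⟩
    · exact (PySem.List.mem_pyRange_one).2 ⟨h1, h2⟩
    · exact List.mem_map.2 ⟨c.2, (PySem.List.mem_pyRange_one).2 ⟨h3, h4⟩, rfl⟩

lemma length_pvCells (n m : Int) : (pvCells n m).length = n.toNat * m.toNat := by
  simp [pvCells, List.length_flatMap, PySem.List.length_pyRange_one, List.map_const']

lemma pvNv_le (n m : Int) (t : List (List Int)) (v : Int) :
    pvNv n m t v ≤ n.toNat * m.toNat := by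
  calc pvNv n m t v ≤ (pvCells n m).length := List.countP_le_length
  _ = n.toNat * m.toNat := length_pvCells n m

lemma pvNv_lt (n m : Int) (t : List (List Int)) (a : Int × Int) (ha : pvInb n m a) :
    pvNv n m t (pvV t a) < pvNv n m t (pvV t a + 1) := by
  unfold pvNv
  have hmem : a ∈ pvCells n m := (mem_pvCells n m a).2 ha
  revert hmem
  generalize pvCells n m = L
  intro hmem
  induction L with
  | nil => simp at hmem
  | cons x l ih =>
    simp only [List.countP_cons]
    rcases List.mem_cons.1 hmem with rfl | hx
    · have h1 : l.countP (fun c => decide (pvV t c < pvV t a)) ≤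
          l.countP (fun c => decide (pvV t c ≤ pvV t a)) := by
        apply List.countP_mono_left
        intro b _ hb
        simp at hb ⊢; omega
      have hx1 : (decide (pvV t a < pvV t a)) = false := by simp
      have hx2 : (decide (pvV t a < pvV t a + 1)) = true := by simp
      rw [hx1, hx2]
      simp; omega
    · have h2 := ih hx
      have h1 : (if decide (pvV t x < pvV t a) = true then 1 else 0) ≤
          (if decide (pvV t x < pvV t a + 1) = true then 1 else 0) := by
        by_cases h : pvV t x < pvV t a
        · have h' : pvV t x < pvV t a + 1 := by omega
          simp [h, h']
        · simp [h]
      omega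

lemma pvFoldstep_cons (n m : Int) (t : List (List Int)) (c : Int × Int)
    (g : (Int × Int) → Int) (d : Int × Int) (ds : List (Int × Int)) (b : Int) :
    pvFoldstep n m t c g (d :: ds) b =
      pvFoldstep n m t c g ds
        (if 0 ≤ c.1 + d.1 ∧ c.1 + d.1 < n ∧ 0 ≤ c.2 + d.2 ∧ c.2 + d.2 < m ∧
            pvV t (c.1 + d.1, c.2 + d.2) = pvV t c - 1 then
          max b (g (c.1 + d.1, c.2 + d.2) + 1)
        else b) := rfl

lemma pvFoldstep_congr (n m : Int) (t : List (List Int)) (c : Int × Int)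
    (g g' : (Int × Int) → Int) (ds : List (Int × Int)) (b : Int)
    (h : ∀ a, pvInb n m a → pvV t a = pvV t c - 1 → g a = g' a) :
    pvFoldstep n m t c g ds b = pvFoldstep n m t c g' ds b := by
  induction ds generalizing b with
  | nil => rfl
  | cons d ds ih =>
    rw [pvFoldstep_cons, pvFoldstep_cons]
    by_cases hq : 0 ≤ c.1 + d.1 ∧ c.1 + d.1 < n ∧ 0 ≤ c.2 + d.2 ∧ c.2 + d.2 < m ∧
        pvV t (c.1 + d.1, c.2 + d.2) = pvV t c - 1
    · rw [if_pos hq, if_pos hq,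
        h (c.1 + d.1, c.2 + d.2) ⟨hq.1, hq.2.1, hq.2.2.1, hq.2.2.2.1⟩ hq.2.2.2.2]
      exact ih _
    · rw [if_neg hq, if_neg hq]; exact ih _

lemma pvFoldstep_noqual (n m : Int) (t : List (List Int)) (c : Int × Int)
    (g : (Int × Int) → Int) (ds : List (Int × Int)) (b : Int)
    (h : ∀ a, pvInb n m a → pvV t a = pvV t c - 1 → False) :
    pvFoldstep n m t c g ds b = b := by
  induction ds generalizing b with
  | nil => rfl
  | cons d ds ih =>
    rw [pvFoldstep_cons, if_neg, ih]
    rintro ⟨h1, h2, h3, h4, h5⟩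
    exact h (c.1 + d.1, c.2 + d.2) ⟨h1, h2, h3, h4⟩ h5

lemma pvL_succ (n m : Int) (t : List (List Int)) :
    ∀ (k : Nat) (c : Int × Int), pvInb n m c → pvNv n m t (pvV t c) ≤ k →
    pvL n m t (k + 1) c = pvL n m t k c := by
  intro k
  induction k with
  | zero =>
    intro c hc hk
    show pvFoldstep n m t c (pvL n m t 0) pvDiffs 1 = 1
    apply pvFoldstep_noqual
    intro a ha hv
    have hlt : pvNv n m t (pvV t a) < pvNv n m t (pvV t a + 1) := pvNv_lt n m t a ha
    have he : pvV t a + 1 = pvV t c := by omega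
    rw [he] at hlt
    omega
  | succ k ih =>
    intro c hc hk
    show pvFoldstep n m t c (pvL n m t (k + 1)) pvDiffs 1 =
      pvFoldstep n m t c (pvL n m t k) pvDiffs 1
    apply pvFoldstep_congr
    intro a ha hv
    apply ih a ha
    have h1 : pvNv n m t (pvV t a) < pvNv n m t (pvV t a + 1) := pvNv_lt n m t a ha
    have h2 : pvV t a + 1 = pvV t c := by omega
    rw [h2] at h1
    omega

lemma pvL_stable (n m : Int) (t : List (List Int)) (k : Nat) (c : Int × Int)
    (hc : pvInb n m c) (hk : pvNv n m t (pvV t c) ≤ k) :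
    pvL n m t k c = pvLL n m t c := by
  unfold pvLL
  have key : ∀ (j j' : Nat), pvNv n m t (pvV t c) ≤ j → j ≤ j' →
      pvL n m t j' c = pvL n m t j c := by
    intro j j' hj hjj
    induction j' with
    | zero => have : j = 0 := by omega
              rw [this]
    | succ j' ih =>
      by_cases h : j = j' + 1
      · rw [h]
      · have hle : j ≤ j' := by omega
        rw [pvL_succ n m t j' c hc (le_trans hj hle), ih hle]
  rcases le_total k (n.toNat * m.toNat) with h | h
  · rw [key k (n.toNat * m.toNat) hk h]
  · rw [key (n.toNat * m.toNat) k (pvNv_le n m t _) h]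

lemma pvLL_unfold (n m : Int) (t : List (List Int)) (c : Int × Int) (hc : pvInb n m c) :
    pvFoldstep n m t c (pvLL n m t) pvDiffs 1 = pvLL n m t c := by
  have h1 : pvFoldstep n m t c (pvLL n m t) pvDiffs 1 =
      pvFoldstep n m t c (pvL n m t (n.toNat * m.toNat)) pvDiffs 1 := rfl
  have h2 : pvFoldstep n m t c (pvL n m t (n.toNat * m.toNat)) pvDiffs 1 =
      pvL n m t (n.toNat * m.toNat + 1) c := rfl
  rw [h1, h2]
  exact pvL_stable n m t _ c hc (le_trans (pvNv_le n m t _) (Nat.le_succ _))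

-- the generic neighbour-loop lemma for A (used for `helper`'s loop and the outer loop)
lemma pvAfold (n m : Int) (t : List (List Int))
    (h : (Int × Int) → ((Int × Int) → Int) → (((Int × Int) → Int) × Int))
    (c : Int × Int) (hc : pvInb n m c)
    (Hrec : ∀ a dp', pvInb n m a → pvV t a = pvV t c - 1 →
      (∀ c', pvInb n m c' → pvV t c' < pvV t a → dp' c' = -1 ∨ dp' c' = pvLL n m t c') →
      (h a dp').2 = pvLL n m t a ∧
      (∀ x, (h a dp').1 x = dp' x ∨ (pvInb n m x ∧ (h a dp').1 x = pvLL n m t x))) :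
    ∀ (ds : List (Int × Int)), (∀ d ∈ ds, d ∈ pvDiffs) →
    ∀ (dpk : (Int × Int) → Int) (b : Int), dpk c = b →
    (∀ c', pvInb n m c' → pvV t c' < pvV t c → dpk c' = -1 ∨ dpk c' = pvLL n m t c') →
    (ds.foldl (pvAStep n m t h c) dpk) c = pvFoldstep n m t c (pvLL n m t) ds b ∧
    (∀ x, x ≠ c → (ds.foldl (pvAStep n m t h c) dpk) x = dpk x ∨
      (pvInb n m x ∧ (ds.foldl (pvAStep n m t h c) dpk) x = pvLL n m t x)) := by
  intro ds
  induction ds with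
  | nil =>
    intro _ dpk b hb _
    exact ⟨hb, fun x _ => Or.inl rfl⟩
  | cons d ds ih =>
    intro hds dpk b hb Hbelow
    have hd : d ∈ pvDiffs := hds d List.mem_cons_self
    have hds' : ∀ d' ∈ ds, d' ∈ pvDiffs := fun d' hd' => hds d' (List.mem_cons_of_mem d hd')
    have hdr : (-1 ≤ d.1 ∧ d.1 ≤ 1) ∧ (-1 ≤ d.2 ∧ d.2 ≤ 1) := by
      simp only [pvDiffs, List.mem_cons, List.not_mem_nil, or_false] at hd
      rcases hd with rfl | rfl | rfl | rfl <;> norm_num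
    obtain ⟨hc1, hc2, hc3, hc4⟩ := hc
    -- one step of A's loop
    have hstep :
        (pvAStep n m t h c dpk d) c =
          (if 0 ≤ c.1 + d.1 ∧ c.1 + d.1 < n ∧ 0 ≤ c.2 + d.2 ∧ c.2 + d.2 < m ∧
              pvV t (c.1 + d.1, c.2 + d.2) = pvV t c - 1 then
            max b (pvLL n m t (c.1 + d.1, c.2 + d.2) + 1)
          else b) ∧
        (∀ x, x ≠ c → (pvAStep n m t h c dpk d) x = dpk x ∨
          (pvInb n m x ∧ (pvAStep n m t h c dpk d) x = pvLL n m t x)) := by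
      by_cases hbnd : c.1 + d.1 = n ∨ c.1 + d.1 < 0 ∨ c.2 + d.2 = m ∨ c.2 + d.2 < 0
      · have hq : ¬ (0 ≤ c.1 + d.1 ∧ c.1 + d.1 < n ∧ 0 ≤ c.2 + d.2 ∧ c.2 + d.2 < m ∧
            pvV t (c.1 + d.1, c.2 + d.2) = pvV t c - 1) := by
          rintro ⟨q1, q2, q3, q4, _⟩
          rcases hbnd with hh | hh | hh | hh <;> omega
        rw [if_neg hq]
        simp only [pvAStep]
        rw [if_pos hbnd]
        exact ⟨hb, fun x _ => Or.inl rfl⟩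
      · have hInb : pvInb n m (c.1 + d.1, c.2 + d.2) := by
          refine ⟨?_, ?_, ?_, ?_⟩ <;> simp <;> omega
        by_cases hv : pvVal t c.1 c.2 - pvVal t (c.1 + d.1, c.2 + d.2).1 (c.1 + d.1, c.2 + d.2).2 = 1
        · have hv' : pvVal t c.1 c.2 - pvVal t (c.1 + d.1) (c.2 + d.2) = 1 := hv
          have hva : pvV t (c.1 + d.1, c.2 + d.2) = pvV t c - 1 := by
            show pvVal t (c.1 + d.1) (c.2 + d.2) = pvVal t c.1 c.2 - 1
            omega
          have hq : (0 ≤ c.1 + d.1 ∧ c.1 + d.1 < n ∧ 0 ≤ c.2 + d.2 ∧ c.2 + d.2 < m ∧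
              pvV t (c.1 + d.1, c.2 + d.2) = pvV t c - 1) :=
            ⟨hInb.1, hInb.2.1, hInb.2.2.1, hInb.2.2.2, hva⟩
          rw [if_pos hq]
          by_cases hm : dpk (c.1 + d.1, c.2 + d.2) = -1
          · have hBa : ∀ c', pvInb n m c' → pvV t c' < pvV t (c.1 + d.1, c.2 + d.2) →
                dpk c' = -1 ∨ dpk c' = pvLL n m t c' := by
              intro c' hcin hlt
              exact Hbelow c' hcin (by omega)
            obtain ⟨hr2, hrf⟩ := Hrec (c.1 + d.1, c.2 + d.2) dpk hInb hva hBa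
            have hne : ¬ (c.1 + d.1 = n ∨ c.1 + d.1 < 0 ∨ c.2 + d.2 = m ∨ c.2 + d.2 < 0) := hbnd
            simp only [pvAStep]
            rw [if_neg hne, if_pos hv, if_pos hm]
            constructor
            · simp [hb, hr2]
            · intro x hx
              simp only [if_neg hx]
              exact hrf x
          · have hLa : dpk (c.1 + d.1, c.2 + d.2) = pvLL n m t (c.1 + d.1, c.2 + d.2) := by
              rcases Hbelow (c.1 + d.1, c.2 + d.2) hInb (by omega) with hh | hh
              · exact absurd hh hm
              · exact hh
            simp only [pvAStep]
            rw [if_neg hbnd, if_pos hv, if_neg hm]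
            constructor
            · simp [hb, hLa]
            · intro x hx
              simp [hx]
        · have hq : ¬ (0 ≤ c.1 + d.1 ∧ c.1 + d.1 < n ∧ 0 ≤ c.2 + d.2 ∧ c.2 + d.2 < m ∧
              pvV t (c.1 + d.1, c.2 + d.2) = pvV t c - 1) := by
            rintro ⟨_, _, _, _, q5⟩
            apply hv
            have q5' : pvVal t (c.1 + d.1) (c.2 + d.2) = pvVal t c.1 c.2 - 1 := q5
            show pvVal t c.1 c.2 - pvVal t (c.1 + d.1) (c.2 + d.2) = 1
            omega
          rw [if_neg hq]
          simp only [pvAStep]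
          rw [if_neg hbnd, if_neg hv]
          exact ⟨hb, fun x _ => Or.inl rfl⟩
    obtain ⟨h1, h2⟩ := hstep
    have hB1 : ∀ c', pvInb n m c' → pvV t c' < pvV t c →
        (pvAStep n m t h c dpk d) c' = -1 ∨ (pvAStep n m t h c dpk d) c' = pvLL n m t c' := by
      intro c' hcin hlt
      have hne : c' ≠ c := by
        intro hcc
        rw [hcc] at hlt
        exact lt_irrefl _ hlt
      rcases h2 c' hne with hh | ⟨_, hh⟩
      · rw [hh]; exact Hbelow c' hcin hlt
      · exact Or.inr hh
    obtain ⟨ih1, ih2⟩ := ih hds' (pvAStep n m t h c dpk d) ((pvAStep n m t h c dpk d) c) rfl hB1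
    constructor
    · show (ds.foldl (pvAStep n m t h c) (pvAStep n m t h c dpk d)) c = _
      rw [pvFoldstep_cons, ih1, h1]
    · intro x hx
      rcases ih2 x hx with hh | hh
      · rcases h2 x hx with hg | hg
        · exact Or.inl (hh.trans hg)
        · exact Or.inr ⟨hg.1, hh.trans hg.2⟩
      · exact Or.inr hh

lemma pvHelperA_correct (n m : Int) (t : List (List Int)) :
    ∀ (F : Nat) (c : Int × Int) (dp : (Int × Int) → Int),
    pvInb n m c → pvNv n m t (pvV t c) < F →
    (∀ c', pvInb n m c' → pvV t c' < pvV t c → dp c' = -1 ∨ dp c' = pvLL n m t c') →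
    (pvHelperA n m t F c dp).2 = pvLL n m t c ∧
    (∀ x, (pvHelperA n m t F c dp).1 x = dp x ∨
      (pvInb n m x ∧ (pvHelperA n m t F c dp).1 x = pvLL n m t x)) := by
  intro F
  induction F with
  | zero =>
    intro c dp hc hF hB
    exact absurd hF (Nat.not_lt_zero _)
  | succ F ih =>
    intro c dp hc hF hB
    have Hrec : ∀ a dp', pvInb n m a → pvV t a = pvV t c - 1 →
        (∀ c', pvInb n m c' → pvV t c' < pvV t a → dp' c' = -1 ∨ dp' c' = pvLL n m t c') →
        (pvHelperA n m t F a dp').2 = pvLL n m t a ∧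
        (∀ x, (pvHelperA n m t F a dp').1 x = dp' x ∨
          (pvInb n m x ∧ (pvHelperA n m t F a dp').1 x = pvLL n m t x)) := by
      intro a dp' ha hva hB'
      refine ih a dp' ha ?_ hB'
      have h1 := pvNv_lt n m t a ha
      have h2 : pvV t a + 1 = pvV t c := by omega
      rw [h2] at h1
      omega
    have hdpk : (fun x => if x = c then 1 else dp x) c = (1 : Int) := by simp
    have hBk : ∀ c', pvInb n m c' → pvV t c' < pvV t c →
        (fun x => if x = c then (1 : Int) else dp x) c' = -1 ∨
        (fun x => if x = c then (1 : Int) else dp x) c' = pvLL n m t c' := by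
      intro c' hc' hlt
      have hne : c' ≠ c := by
        intro hcc; rw [hcc] at hlt; exact lt_irrefl _ hlt
      simp only [if_neg hne]
      exact hB c' hc' hlt
    obtain ⟨hf1, hf2⟩ := pvAfold n m t (pvHelperA n m t F) c hc Hrec pvDiffs
      (fun _ hd => hd) (fun x => if x = c then 1 else dp x) 1 hdpk hBk
    have hLc : (pvDiffs.foldl (pvAStep n m t (pvHelperA n m t F) c)
        (fun x => if x = c then 1 else dp x)) c = pvLL n m t c := by
      rw [hf1]
      exact pvLL_unfold n m t c hc
    constructor
    · exact hLc
    · intro x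
      by_cases hx : x = c
      · subst hx
        exact Or.inr ⟨hc, hLc⟩
      · rcases hf2 x hx with hh | hh
        · simp only [if_neg hx] at hh
          exact Or.inl hh
        · exact Or.inr hh

-- A's outer-loop body for one cell, and the row / grid folds, named for the proofs
def pvBody (n m : Int) (t : List (List Int)) (dp : (Int × Int) → Int) (i j : Int) :
    (Int × Int) → Int :=
  if dp (i, j) ≠ -1 then dp
  else
    pvDiffs.foldl (pvAStep n m t (pvHelperA n m t (n.toNat * m.toNat + 1)) (i, j))
      (fun x => if x = (i, j) then 1 else dp x)

def pvRowFold (n m : Int) (t : List (List Int)) (i : Int) (js : List Int)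
    (dp : (Int × Int) → Int) : (Int × Int) → Int :=
  js.foldl (fun dp j => pvBody n m t dp i j) dp

def pvGridFold (n m : Int) (t : List (List Int)) (is : List Int)
    (dp : (Int × Int) → Int) : (Int × Int) → Int :=
  is.foldl (fun dp i => pvRowFold n m t i (PySem.List.pyRange 0 m 1) dp) dp

lemma pvBody_correct (n m : Int) (t : List (List Int)) (dp : (Int × Int) → Int)
    (i j : Int) (hij : pvInb n m (i, j))
    (Hall : ∀ c', pvInb n m c' → dp c' = -1 ∨ dp c' = pvLL n m t c') :
    pvBody n m t dp i j (i, j) = pvLL n m t (i, j) ∧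
    (∀ x, pvBody n m t dp i j x = dp x ∨ pvBody n m t dp i j x = pvLL n m t x) ∧
    (∀ c', pvInb n m c' →
      pvBody n m t dp i j c' = -1 ∨ pvBody n m t dp i j c' = pvLL n m t c') := by
  unfold pvBody
  by_cases hs : dp (i, j) ≠ -1
  · rw [if_pos hs]
    have hL : dp (i, j) = pvLL n m t (i, j) := by
      rcases Hall (i, j) hij with hh | hh
      · exact absurd hh hs
      · exact hh
    exact ⟨hL, fun x => Or.inl rfl, Hall⟩
  · rw [if_neg hs]
    have Hrec : ∀ a dp', pvInb n m a → pvV t a = pvV t (i, j) - 1 →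
        (∀ c', pvInb n m c' → pvV t c' < pvV t a → dp' c' = -1 ∨ dp' c' = pvLL n m t c') →
        (pvHelperA n m t (n.toNat * m.toNat + 1) a dp').2 = pvLL n m t a ∧
        (∀ x, (pvHelperA n m t (n.toNat * m.toNat + 1) a dp').1 x = dp' x ∨
          (pvInb n m x ∧
            (pvHelperA n m t (n.toNat * m.toNat + 1) a dp').1 x = pvLL n m t x)) := by
      intro a dp' ha _ hB'
      exact pvHelperA_correct n m t _ a dp' ha
        (Nat.lt_succ_of_le (pvNv_le n m t _)) hB'
    have hdpk : (fun x => if x = (i, j) then 1 else dp x) (i, j) = (1 : Int) := by simp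
    have hBk : ∀ c', pvInb n m c' → pvV t c' < pvV t (i, j) →
        (fun x => if x = (i, j) then (1 : Int) else dp x) c' = -1 ∨
        (fun x => if x = (i, j) then (1 : Int) else dp x) c' = pvLL n m t c' := by
      intro c' hc' hlt
      have hne : c' ≠ (i, j) := by
        intro hcc; rw [hcc] at hlt; exact lt_irrefl _ hlt
      simp only [if_neg hne]
      exact Hall c' hc' 
    obtain ⟨hf1, hf2⟩ := pvAfold n m t (pvHelperA n m t (n.toNat * m.toNat + 1)) (i, j)
      hij Hrec pvDiffs (fun _ hd => hd) (fun x => if x = (i, j) then 1 else dp x) 1 hdpk hBk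
    have hLc : (pvDiffs.foldl
        (pvAStep n m t (pvHelperA n m t (n.toNat * m.toNat + 1)) (i, j))
        (fun x => if x = (i, j) then 1 else dp x)) (i, j) = pvLL n m t (i, j) := by
      rw [hf1]
      exact pvLL_unfold n m t (i, j) hij
    refine ⟨hLc, ?_, ?_⟩
    · intro x
      by_cases hx : x = (i, j)
      · subst hx
        exact Or.inr hLc
      · rcases hf2 x hx with hh | hh
        · simp only [if_neg hx] at hh
          exact Or.inl hh
        · exact Or.inr hh.2
    · intro c' hc'
      by_cases hx : c' = (i, j)
      · subst hx
        exact Or.inr hLc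
      · rcases hf2 c' hx with hh | hh
        · simp only [if_neg hx] at hh
          rw [hh]
          exact Hall c' hc'
        · exact Or.inr hh.2

lemma pvRow_correct (n m : Int) (t : List (List Int)) (i : Int) (hi : 0 ≤ i ∧ i < n) :
    ∀ (js : List Int), (∀ j ∈ js, 0 ≤ j ∧ j < m) →
    ∀ (dp : (Int × Int) → Int),
    (∀ c', pvInb n m c' → dp c' = -1 ∨ dp c' = pvLL n m t c') →
    (∀ c', pvInb n m c' →
        pvRowFold n m t i js dp c' = -1 ∨ pvRowFold n m t i js dp c' = pvLL n m t c') ∧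
    (∀ x, pvRowFold n m t i js dp x = dp x ∨ pvRowFold n m t i js dp x = pvLL n m t x) ∧
    (∀ j ∈ js, pvRowFold n m t i js dp (i, j) = pvLL n m t (i, j)) := by
  intro js
  induction js with
  | nil =>
    intro _ dp Hall
    exact ⟨Hall, fun x => Or.inl rfl, by simp⟩
  | cons j js ihj =>
    intro hjs dp Hall
    have hj := hjs j List.mem_cons_self
    have hjs' : ∀ j' ∈ js, 0 ≤ j' ∧ j' < m := fun j' hj' => hjs j' (List.mem_cons_of_mem j hj')
    have hij : pvInb n m (i, j) := ⟨hi.1, hi.2, hj.1, hj.2⟩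
    obtain ⟨b1, b2, b3⟩ := pvBody_correct n m t dp i j hij Hall
    have hrw : pvRowFold n m t i (j :: js) dp = pvRowFold n m t i js (pvBody n m t dp i j) := rfl
    obtain ⟨r1, r2, r3⟩ := ihj hjs' (pvBody n m t dp i j) b3
    rw [hrw]
    refine ⟨r1, ?_, ?_⟩
    · intro x
      rcases r2 x with hh | hh
      · rw [hh]
        exact b2 x
      · exact Or.inr hh
    · intro j' hj'
      rcases List.mem_cons.1 hj' with rfl | hmem
      · rcases r2 (i, j') with hh | hh
        · rw [hh, b1]
        · exact hh
      · exact r3 j' hmem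

lemma pvGrid_correct (n m : Int) (t : List (List Int)) :
    ∀ (is : List Int), (∀ i ∈ is, 0 ≤ i ∧ i < n) →
    ∀ (dp : (Int × Int) → Int),
    (∀ c', pvInb n m c' → dp c' = -1 ∨ dp c' = pvLL n m t c') →
    (∀ c', pvInb n m c' →
        pvGridFold n m t is dp c' = -1 ∨ pvGridFold n m t is dp c' = pvLL n m t c') ∧
    (∀ x, pvGridFold n m t is dp x = dp x ∨ pvGridFold n m t is dp x = pvLL n m t x) ∧
    (∀ i ∈ is, ∀ j : Int, 0 ≤ j → j < m →
        pvGridFold n m t is dp (i, j) = pvLL n m t (i, j)) := by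
  intro is
  induction is with
  | nil =>
    intro _ dp Hall
    exact ⟨Hall, fun x => Or.inl rfl, by simp⟩
  | cons i is ihi =>
    intro his dp Hall
    have hi := his i List.mem_cons_self
    have his' : ∀ i' ∈ is, 0 ≤ i' ∧ i' < n := fun i' hi' => his i' (List.mem_cons_of_mem i hi')
    have hb : ∀ j' ∈ PySem.List.pyRange 0 m 1, 0 ≤ j' ∧ j' < m := by
      intro j' hj'
      exact (PySem.List.mem_pyRange_one).1 hj'
    obtain ⟨q1, q2, q3⟩ := pvRow_correct n m t i hi (PySem.List.pyRange 0 m 1) hb dp Hall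
    have hrw : pvGridFold n m t (i :: is) dp =
        pvGridFold n m t is (pvRowFold n m t i (PySem.List.pyRange 0 m 1) dp) := rfl
    obtain ⟨r1, r2, r3⟩ := ihi his' (pvRowFold n m t i (PySem.List.pyRange 0 m 1) dp) q1
    rw [hrw]
    refine ⟨r1, ?_, ?_⟩
    · intro x
      rcases r2 x with hh | hh
      · rw [hh]
        exact q2 x
      · exact Or.inr hh
    · intro i' hi' j' hj0 hjm
      rcases List.mem_cons.1 hi' with rfl | hmem
      · have hq3 := q3 j' ((PySem.List.mem_pyRange_one).2 ⟨hj0, hjm⟩)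
        rcases r2 (i', j') with hh | hh
        · rw [hh, hq3]
        · exact hh
      · exact r3 i' hmem j' hj0 hjm

lemma chain_in_table_eq_maxLL (n m : Int) (t : List (List Int)) :
    chain_in_table n m t =
      (pvCells n m).foldl (fun a c => max a (pvLL n m t c)) 0 := by
  have hrfl : chain_in_table n m t =
      (PySem.List.pyRange 0 n 1).foldl (fun ans i =>
        (PySem.List.pyRange 0 m 1).foldl (fun ans j =>
          max ans (pvGridFold n m t (PySem.List.pyRange 0 n 1) (fun _ => (-1 : Int)) (i, j)))
          ans) 0 := rfl
  have hbnd : ∀ i ∈ PySem.List.pyRange 0 n 1, 0 ≤ i ∧ i < n := by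
    intro i hi
    exact (PySem.List.mem_pyRange_one).1 hi
  have Hall0 : ∀ c', pvInb n m c' → (fun _ => (-1 : Int)) c' = -1 ∨
      (fun _ => (-1 : Int)) c' = pvLL n m t c' := fun _ _ => Or.inl rfl
  obtain ⟨-, -, hdone⟩ := pvGrid_correct n m t (PySem.List.pyRange 0 n 1) hbnd
    (fun _ => (-1 : Int)) Hall0
  have hnest : (pvCells n m).foldl
      (fun a c => max a (pvGridFold n m t (PySem.List.pyRange 0 n 1) (fun _ => (-1 : Int)) c)) 0 =
      (PySem.List.pyRange 0 n 1).foldl (fun ans i =>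
        (PySem.List.pyRange 0 m 1).foldl (fun ans j =>
          max ans (pvGridFold n m t (PySem.List.pyRange 0 n 1) (fun _ => (-1 : Int)) (i, j)))
          ans) 0 := by
    rw [pvCells, List.foldl_flatMap]
    simp [List.foldl_map]
  rw [hrfl, ← hnest]
  apply PySem.List.foldl_congr_mem
  intro acc x hx
  have hInb := (mem_pvCells n m x).1 hx
  have : pvGridFold n m t (PySem.List.pyRange 0 n 1) (fun _ => (-1 : Int)) (x.1, x.2) =
      pvLL n m t (x.1, x.2) := by
    apply hdone x.1 ((PySem.List.mem_pyRange_one).2 ⟨hInb.1, hInb.2.1⟩) x.2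
      hInb.2.2.1 hInb.2.2.2
  rw [show ((x.1, x.2) : Int × Int) = x from rfl] at this
  rw [this]

-- B's loop body, named for the proofs (syntactically the fold body of the port of B)
def pvBStep (n m : Int) (table : List (List Int))
    (st : ((Int × Int) → Int) × Int) (t : Int × (Int × Int)) :
    ((Int × Int) → Int) × Int :=
  let i := t.2.1
  let j := t.2.2
  let best := [(i - 1, j), (i, j - 1), (i + 1, j), (i, j + 1)].foldl
    (fun best a =>
      if 0 ≤ a.1 ∧ a.1 < n ∧ 0 ≤ a.2 ∧ a.2 < m ∧ pvVal table a.1 a.2 = t.1 - 1 then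
        max best (st.1 a + 1)
      else best) 1
  (fun x => if x = (i, j) then best else st.1 x, max st.2 best)

-- B's inner neighbour fold computes pvFoldstep
lemma pvBbest_eq (n m : Int) (t : List (List Int)) (v : Int) (i j : Int)
    (g : (Int × Int) → Int) (hv : v = pvV t (i, j)) :
    ([((i : Int) - 1, j), (i, j - 1), (i + 1, j), (i, j + 1)].foldl
      (fun best a =>
        if 0 ≤ a.1 ∧ a.1 < n ∧ 0 ≤ a.2 ∧ a.2 < m ∧ pvVal t a.1 a.2 = v - 1 then
          max best (g a + 1)
        else best) 1) = pvFoldstep n m t (i, j) g pvDiffs 1 := by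
  subst hv
  show _ = pvFoldstep n m t (i, j) g pvDiffs 1
  simp only [pvFoldstep, pvDiffs, List.foldl_cons, List.foldl_nil, pvV, pvVal]
  norm_num [sub_eq_add_neg]

-- B's main loop invariant: processing the cells in sorted order fills dp with pvLL
-- and accumulates the running maximum of pvLL over the processed prefix
lemma pvBfold (n m : Int) (t : List (List Int)) :
    ∀ (rest pre : List (Int × (Int × Int))) (dp : (Int × Int) → Int) (ans : Int),
    (pre ++ rest).Pairwise (fun a b => a.1 ≤ b.1) →
    (∀ p ∈ pre ++ rest, p.2 ∈ pvCells n m ∧ p.1 = pvV t p.2) →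
    (∀ c ∈ pvCells n m, (pvV t c, c) ∈ pre ++ rest) →
    (∀ p ∈ pre, dp p.2 = pvLL n m t p.2) →
    ans = pre.foldl (fun a p => max a (pvLL n m t p.2)) 0 →
    (rest.foldl (pvBStep n m t) (dp, ans)).2 =
      (pre ++ rest).foldl (fun a p => max a (pvLL n m t p.2)) 0 := by
  intro rest
  induction rest with
  | nil =>
    intro pre dp ans _ _ _ _ hans
    simpa using hans
  | cons p rest' ih =>
    obtain ⟨v, i, j⟩ := p
    intro pre dp ans hpair helem hcompl hdp hans
    have hpmem : ((v, (i, j)) : Int × (Int × Int)) ∈ pre ++ (v, (i, j)) :: rest' := by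
      simp
    obtain ⟨hcin, hveq⟩ := helem _ hpmem
    have hInb : pvInb n m (i, j) := (mem_pvCells n m (i, j)).1 hcin
    -- every by-1-smaller in-bounds neighbour has already been processed
    have hnb : ∀ a, pvInb n m a → pvV t a = pvV t (i, j) - 1 → dp a = pvLL n m t a := by
      intro a ha hva
      have hmem : ((pvV t a, a) : Int × (Int × Int)) ∈ pre ++ (v, (i, j)) :: rest' :=
        hcompl a ((mem_pvCells n m a).2 ha)
      rcases List.mem_append.1 hmem with hpre | hcons
      · exact hdp _ hpre
      · exfalso
        rcases List.mem_cons.1 hcons with heq | hrest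
        · have : pvV t a = v := congrArg Prod.fst heq
          simp only at hveq
          omega
        · have hp2 := (List.pairwise_append.1 hpair).2.1
          have := (List.pairwise_cons.1 hp2).1 _ hrest
          simp only at this hveq
          omega
    -- B's best is the true chain length at (i, j)
    have hbest : ([((i : Int) - 1, j), (i, j - 1), (i + 1, j), (i, j + 1)].foldl
        (fun best a =>
          if 0 ≤ a.1 ∧ a.1 < n ∧ 0 ≤ a.2 ∧ a.2 < m ∧ pvVal t a.1 a.2 = v - 1 then
            max best (dp a + 1)
          else best) 1) = pvLL n m t (i, j) := by
      have h0 : v = pvV t (i, j) := by simpa using hveq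
      rw [pvBbest_eq n m t v i j dp h0]
      rw [pvFoldstep_congr n m t (i, j) dp (pvLL n m t) pvDiffs 1 hnb]
      exact pvLL_unfold n m t (i, j) hInb
    have hstep : pvBStep n m t (dp, ans) (v, (i, j)) =
        (fun x => if x = (i, j) then pvLL n m t (i, j) else dp x,
          max ans (pvLL n m t (i, j))) := by
      unfold pvBStep
      simp only
      rw [hbest]
    have hassoc : pre ++ (v, (i, j)) :: rest' = (pre ++ [(v, (i, j))]) ++ rest' := by
      simp
    rw [List.foldl_cons, hstep]
    rw [hassoc] at hpair helem hcompl ⊢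
    refine ih (pre ++ [(v, (i, j))]) _ _ hpair helem hcompl ?_ ?_
    · intro p' hp'
      rcases List.mem_append.1 hp' with hh | hh
      · by_cases hx : p'.2 = (i, j)
        · simp [hx]
        · simp only [if_neg hx]
          exact hdp _ hh
      · have : p' = (v, (i, j)) := by simpa using hh
        rw [this]
        simp
    · rw [List.foldl_append, ← hans]
      simp

lemma chain_in_table_alt_eq_maxLL (n m : Int) (t : List (List Int)) :
    chain_in_table_alt n m t =
      (pvCells n m).foldl (fun a c => max a (pvLL n m t c)) 0 := by
  have hlist : ((PySem.List.pyRange 0 n 1).flatMap (fun i =>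
      (PySem.List.pyRange 0 m 1).map (fun j => (pvVal t i j, (i, j))))) =
      (pvCells n m).map (fun c => (pvV t c, c)) := by
    rw [pvCells, List.map_flatMap]
    simp [List.map_map, Function.comp_def, pvV]
  have hrfl : chain_in_table_alt n m t =
      ((PySem.List.sorted ((PySem.List.pyRange 0 n 1).flatMap (fun i =>
        (PySem.List.pyRange 0 m 1).map (fun j => (pvVal t i j, (i, j)))))
        (fun t => t.1) false).foldl (pvBStep n m t) (fun _ => (0 : Int), 0)).2 := rfl
  rw [hrfl, hlist]
  set P := PySem.List.sorted ((pvCells n m).map (fun c => (pvV t c, c))) (fun t => t.1) false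
    with hP
  have hperm : P.Perm ((pvCells n m).map (fun c => (pvV t c, c))) :=
    PySem.List.sorted_perm _ _ _
  have hpair : P.Pairwise (fun a b => a.1 ≤ b.1) := PySem.List.sorted_pairwise _ _
  have helem : ∀ p ∈ ([] : List (Int × (Int × Int))) ++ P,
      p.2 ∈ pvCells n m ∧ p.1 = pvV t p.2 := by
    intro p hp
    have : p ∈ (pvCells n m).map (fun c => (pvV t c, c)) := hperm.mem_iff.1 (by simpa using hp)
    rcases List.mem_map.1 this with ⟨c, hc, rfl⟩
    exact ⟨hc, rfl⟩
  have hcompl : ∀ c ∈ pvCells n m, ((pvV t c, c) : Int × (Int × Int)) ∈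
      ([] : List (Int × (Int × Int))) ++ P := by
    intro c hc
    simp only [List.nil_append]
    exact hperm.mem_iff.2 (List.mem_map.2 ⟨c, hc, rfl⟩)
  have hB := pvBfold n m t P [] (fun _ => (0 : Int)) 0 (by simpa using hpair) helem hcompl
    (by simp) (by simp)
  simp only [List.nil_append] at hB
  rw [hB]
  have hpermfold : P.foldl (fun a p => max a (pvLL n m t p.2)) 0 =
      ((pvCells n m).map (fun c => (pvV t c, c))).foldl
        (fun a p => max a (pvLL n m t p.2)) 0 := by
    exact @List.Perm.foldl_eq _ _ (fun (a : Int) (p : Int × (Int × Int)) => max a (pvLL n m t p.2))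
      _ _ ⟨fun b a₁ a₂ => max_right_comm b _ _⟩ hperm 0
  rw [hpermfold, List.foldl_map]

-- ===== VERDICT (by name: the statement is the Claim_ definition above) =====
theorem chain_in_table_spec : Claim_equal_chain_in_table := by
  intro n m table _ _
  unfold Spec_chain_in_table
  rw [chain_in_table_eq_maxLL, chain_in_table_alt_eq_maxLL]
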